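-- pv_equiv track=rewrite | github.com/mariyauson/cti_codechecks | module202.py | func
-- ===== SOURCE A (Python) =====
-- def func(n,m):
--     array = []
--     for i in range(n):
--         row = []
--         for j in range(m):
--             if i%2 != 0:
--                 if j%2 == 0:
--                     row.append( "*")
--                 else:
--                     row.append( ".")
--             elif i%2 == 0:
--                 if j%2 == 0:
--                     row.append(".")
--                 else:
--                     row.append("*")
--         array.append(row)
--     return array
-- ===== SOURCE B (Python) =====
-- def func(n, m):
--     result = []
--     for i in range(n):
--         pattern = ".*" if i % 2 == 0 else "*."
--         result.append(list((pattern * ((m + 1) // 2))[:m]))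
--     return result
-- ===== Notes on version B (the rewrite author's own statement) =====
-- stated objective: simpler
-- what changed: B eliminates the inner per-cell loop and the four parity branches: each row is built in one step by repeating the 2-char base pattern ('.*' or '*.' by row parity) and slicing to m characters.
import Mathlib
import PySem

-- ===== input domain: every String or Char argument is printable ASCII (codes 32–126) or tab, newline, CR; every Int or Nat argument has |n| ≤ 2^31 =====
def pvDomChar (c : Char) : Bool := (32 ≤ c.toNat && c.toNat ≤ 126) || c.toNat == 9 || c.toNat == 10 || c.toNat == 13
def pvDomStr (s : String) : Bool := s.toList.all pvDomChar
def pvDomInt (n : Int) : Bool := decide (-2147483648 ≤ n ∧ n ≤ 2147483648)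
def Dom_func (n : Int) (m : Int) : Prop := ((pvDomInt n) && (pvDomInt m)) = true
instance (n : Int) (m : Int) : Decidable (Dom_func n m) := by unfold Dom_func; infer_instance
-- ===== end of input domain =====

-- B builds each checkerboard row in one step by repeating a 2-character base pattern and slicing,
-- replacing A's inner per-cell loop and four parity branches (objective: simpler).


-- ===== PORT A =====
def func (n : Int) (m : Int) : List (List String) :=
  (PySem.List.pyRange 0 n 1).foldl (fun array i =>
    array ++ [ (PySem.List.pyRange 0 m 1).foldl (fun row j =>
        if PySem.Int.mod i 2 ≠ 0 then
          (if PySem.Int.mod j 2 = 0 then row ++ ["*"] else row ++ ["."])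
        else if PySem.Int.mod i 2 = 0 then
          (if PySem.Int.mod j 2 = 0 then row ++ ["."] else row ++ ["*"])
        else row) [] ]) []

-- ===== PORT B =====
def func_alt (n : Int) (m : Int) : List (List String) :=
  (PySem.List.pyRange 0 n 1).foldl (fun result i =>
    let pattern : List String := if PySem.Int.mod i 2 = 0 then [".", "*"] else ["*", "."]
    result ++ [ PySem.List.slice
        (PySem.List.pyRepeat pattern (PySem.Int.floordiv (m + 1) 2)) none (some m) ]) []

-- ===== PRECONDITION & SPEC =====
def Spec_func (n : Int) (m : Int) (out : List (List String)) : Prop := out = func_alt n m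
instance (n : Int) (m : Int) (out : List (List String)) : Decidable (Spec_func n m out) := by unfold Spec_func; infer_instance

-- ===== CLAIM (what is proved, stated in full; the proofs are below) =====
def Claim_equal_func : Prop := ∀ (n : Int) (m : Int), Dom_func n m → Spec_func n m (func n m)

-- ===== LEMMAS AND PROOFS =====

-- index into the flattening of q copies of a 2-element list
theorem flatten_replicate_pair_getElem {α : Type} (a b : α) (q j : Nat) (hj : j < 2 * q)
    (hl : j < (List.replicate q [a, b]).flatten.length) :
    (List.replicate q [a, b]).flatten[j] = (if j % 2 = 0 then a else b) := by
  induction q generalizing j with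
  | zero => omega
  | succ q ih =>
    simp only [List.replicate_succ, List.flatten_cons] at hl ⊢
    match j with
    | 0 => simp
    | 1 => simp
    | (j' + 2) =>
      have h2 : (j' + 2) % 2 = j' % 2 := by omega
      rw [h2]
      have : ([a, b] ++ (List.replicate q [a, b]).flatten)[j' + 2] =
          (List.replicate q [a, b]).flatten[j' + 2 - 2]'(by
            simp only [List.length_append, List.length_cons, List.length_nil] at hl; omega) := by
        apply List.getElem_append_right
        simp
      rw [this]
      exact ih j' (by omega) _

-- take k of the repeated pattern is the pointwise checkerboard row
theorem take_flatten_replicate_pair {α : Type} (a b : α) (q k : Nat) (hk : k ≤ 2 * q) :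
    (List.replicate q [a, b]).flatten.take k
      = (List.range k).map (fun j => if j % 2 = 0 then a else b) := by
  apply List.ext_getElem
  · simp; omega
  · intro j h1 h2
    have hj : j < k := by simpa using h2
    have hlen : j < (List.replicate q [a, b]).flatten.length := by simp; omega
    rw [List.getElem_take, flatten_replicate_pair_getElem a b q j (by omega) hlen]
    simp

-- Python's i % 2 agrees with emod for the modulus 2
theorem pymod_two (i : Int) : PySem.Int.mod i 2 = i % 2 :=
  PySem.Int.mod_eq_emod_of_pos (by norm_num)

-- A's inner loop produces exactly B's sliced repeated pattern
theorem row_eq (i m : Int) :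
    (PySem.List.pyRange 0 m 1).foldl (fun row j =>
        if PySem.Int.mod i 2 ≠ 0 then
          (if PySem.Int.mod j 2 = 0 then row ++ ["*"] else row ++ ["."])
        else if PySem.Int.mod i 2 = 0 then
          (if PySem.Int.mod j 2 = 0 then row ++ ["."] else row ++ ["*"])
        else row) []
      = PySem.List.slice
          (PySem.List.pyRepeat
            (if PySem.Int.mod i 2 = 0 then ([".", "*"] : List String) else ["*", "."])
            (PySem.Int.floordiv (m + 1) 2)) none (some m) := by
  -- name the per-cell value and rewrite A's loop body as an append of it
  set g : Int → String := fun j =>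
    if PySem.Int.mod i 2 ≠ 0 then (if PySem.Int.mod j 2 = 0 then "*" else ".")
    else (if PySem.Int.mod j 2 = 0 then "." else "*") with hg
  have hbody : (fun (row : List String) (j : Int) =>
      if PySem.Int.mod i 2 ≠ 0 then
        (if PySem.Int.mod j 2 = 0 then row ++ ["*"] else row ++ ["."])
      else if PySem.Int.mod i 2 = 0 then
        (if PySem.Int.mod j 2 = 0 then row ++ ["."] else row ++ ["*"])
      else row) = fun row j => row ++ [g j] := by
    funext row j
    rcases PySem.Int.mod_two_eq i with h | h <;>
      rcases PySem.Int.mod_two_eq j with h' | h' <;>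
        simp only [hg, h, h', ne_eq] <;> norm_num
  rw [hbody, PySem.List.foldl_append_singleton_eq_map, List.nil_append,
    PySem.List.pyRange_one]
  -- arithmetic facts about q = (m+1)//2
  have hq := PySem.Int.floordiv_mul_add_mod (m + 1) 2
  have hr := PySem.Int.mod_two_eq (m + 1)
  set q : Int := PySem.Int.floordiv (m + 1) 2 with hqdef
  by_cases hm : 0 ≤ m
  · have hq0 : 0 ≤ q := by omega
    have hk : m.toNat ≤ 2 * q.toNat := by omega
    have hm0 : (m - 0).toNat = m.toNat := by omega
    rw [PySem.List.slice_to _ hm]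
    unfold PySem.List.pyRepeat
    have main : ∀ (a b : String),
        (∀ j : Int, g j = if PySem.Int.mod j 2 = 0 then a else b) →
        List.map g (List.map (fun k : Nat => (0 : Int) + (k : Int)) (List.range (m - 0).toNat))
          = List.take m.toNat (List.replicate q.toNat [a, b]).flatten := by
      intro a b hgab
      rw [take_flatten_replicate_pair _ _ _ _ hk, List.map_map, hm0]
      apply List.map_congr_left
      intro k hk'
      have hz : (0 : Int) + (k : Int) = (k : Int) := by omega
      have hmod : PySem.Int.mod ((k : Int)) 2 = ((k % 2 : Nat) : Int) := by
        rw [pymod_two]; omega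
      rw [Function.comp_apply, hz, hgab, hmod]
      by_cases hke : k % 2 = 0
      · rw [if_pos (by exact_mod_cast congrArg (Nat.cast : Nat → Int) hke), if_pos hke]
      · have h1 : k % 2 = 1 := by omega
        rw [if_neg (by omega), if_neg hke]
    rcases PySem.Int.mod_two_eq i with h | h
    · rw [if_pos h]
      refine main "." "*" (fun j => ?_)
      simp only [hg]
      rw [if_neg (by simp only [h]; norm_num)]
    · rw [if_neg (by simp only [h]; norm_num)]
      refine main "*" "." (fun j => ?_)
      simp only [hg]
      rw [if_pos (by simp only [h]; norm_num)]
  · have h1 : (m - 0).toNat = 0 := by omega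
    rw [h1]
    simp only [List.range_zero, List.map_nil]
    have hq0 : q.toNat = 0 := by omega
    have hrep : PySem.List.pyRepeat
        (if PySem.Int.mod i 2 = 0 then ([".", "*"] : List String) else ["*", "."]) q = [] := by
      unfold PySem.List.pyRepeat
      rw [hq0]
      simp
    rw [hrep]
    symm
    simp [PySem.List.slice]

theorem func_eq_alt (n m : Int) : func n m = func_alt n m := by
  unfold func func_alt
  rw [PySem.List.foldl_append_singleton_eq_map
    (f := fun i => (PySem.List.pyRange 0 m 1).foldl (fun row j =>
        if PySem.Int.mod i 2 ≠ 0 then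
          (if PySem.Int.mod j 2 = 0 then row ++ ["*"] else row ++ ["."])
        else if PySem.Int.mod i 2 = 0 then
          (if PySem.Int.mod j 2 = 0 then row ++ ["."] else row ++ ["*"])
        else row) [])]
  rw [PySem.List.foldl_append_singleton_eq_map
    (f := fun i => PySem.List.slice
        (PySem.List.pyRepeat
          (if PySem.Int.mod i 2 = 0 then ([".", "*"] : List String) else ["*", "."])
          (PySem.Int.floordiv (m + 1) 2)) none (some m))]
  simp only [List.nil_append]
  exact List.map_congr_left (fun i _ => row_eq i m)

-- ===== VERDICT (by name: the statement is the Claim_ definition above) =====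
theorem func_spec : Claim_equal_func := by
  intro n m _
  unfold Spec_func
  exact func_eq_alt n m
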